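-- pv_equiv track=rewrite | github.com/ttoru96/coding-test | Programmers/ExhaustiveSearch/모의고사.py | solution
-- ===== SOURCE A (Python) =====
-- def solution(answers):
--     answer = []
--
--     # Initialization
--     counts = [0, 0, 0]
--
--     answer_one = [1, 2, 3, 4, 5]
--     answer_two = [2, 1, 2, 3, 2, 4, 2, 5]
--     answer_three = [3, 3, 1, 1, 2, 2, 4, 4, 5, 5]
--
--     for i in range(0, len(answers)):
--         if answers[i] == answer_one[i % 5]:
--             counts[0] = counts[0] + 1
--
--         if answers[i] == answer_two[i % 8]:
--             counts[1] = counts[1] + 1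
--
--         if answers[i] == answer_three[i % 10]:
--             counts[2] = counts[2] + 1
--
--     # compare the number of answers that three students got right
--     max = 0
--     for i in range(len(counts)):
--         if counts[i] > max:
--             max = counts[i]
--
--     for i in range(len(counts)):
--         if counts[i] == max:
--             answer.append(i + 1)
--
--     return answer
-- ===== SOURCE B (Python) =====
-- def solution(answers):
--     # The three keys repeat with periods 5, 8, 10; lcm = 40. Build one histogram
--     # keyed by (position mod 40, answer value); each student's score is then a
--     # sum of 40 table lookups, independent of the input length.
--     freq = {}
--     for i, a in enumerate(answers):
--         k = (i % 40, a)
--         freq[k] = freq.get(k, 0) + 1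
--     patterns = [[1, 2, 3, 4, 5],
--                 [2, 1, 2, 3, 2, 4, 2, 5],
--                 [3, 3, 1, 1, 2, 2, 4, 4, 5, 5]]
--     counts = [sum(freq.get((j, p[j % len(p)]), 0) for j in range(40))
--               for p in patterns]
--     best = max(counts)
--     return [s + 1 for s, c in enumerate(counts) if c == best]
-- ===== Notes on version B (the rewrite author's own statement) =====
-- stated objective: alternative
-- what changed: Instead of comparing every answer against the three cyclic keys in a combined loop, B builds one histogram keyed by (position mod 40, value) (40 = lcm of the pattern periods 5, 8, 10) in a single pass and computes each student's score as a sum of 40 table lookups, then takes max and the winners.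
import Mathlib
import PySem

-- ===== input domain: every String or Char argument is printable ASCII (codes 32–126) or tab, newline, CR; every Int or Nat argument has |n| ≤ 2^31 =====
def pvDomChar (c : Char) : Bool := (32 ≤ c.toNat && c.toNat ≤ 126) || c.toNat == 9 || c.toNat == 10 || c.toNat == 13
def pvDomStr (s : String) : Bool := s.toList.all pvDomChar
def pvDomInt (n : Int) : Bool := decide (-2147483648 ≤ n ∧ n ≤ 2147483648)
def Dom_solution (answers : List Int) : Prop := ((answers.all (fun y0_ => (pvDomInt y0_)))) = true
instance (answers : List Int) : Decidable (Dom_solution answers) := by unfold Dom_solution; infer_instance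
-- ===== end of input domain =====

-- B replaces A's per-element comparison against the three cyclic keys by a
-- histogram keyed by (position mod 40, value) built in one pass (40 = lcm of the
-- pattern periods); each student's score is then a sum of 40 table lookups
-- (objective: alternative — a different algorithm of the same cost).

-- ===== PORT A =====
-- literal port: one loop over i ∈ range(len(answers)) updating three counters,
-- then a running-max loop over the counts list, then an append loop.
def solution (answers : List Int) : List Int :=
  let answer_one : List Int := [1, 2, 3, 4, 5]
  let answer_two : List Int := [2, 1, 2, 3, 2, 4, 2, 5]
  let answer_three : List Int := [3, 3, 1, 1, 2, 2, 4, 4, 5, 5]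
  -- for i in range(0, len(answers)): three independent 'if' updates of counts[0..2]
  let cs : Int × Int × Int :=
    (PySem.List.pyRange 0 (answers.length : Int) 1).foldl
      (fun (c : Int × Int × Int) i =>
        let a := PySem.List.pyGetD answers i 0      -- answers[i]; i is in range
        ((if a == PySem.List.pyGetD answer_one (PySem.Int.mod i 5) 0 then c.1 + 1 else c.1),
         (if a == PySem.List.pyGetD answer_two (PySem.Int.mod i 8) 0 then c.2.1 + 1 else c.2.1),
         (if a == PySem.List.pyGetD answer_three (PySem.Int.mod i 10) 0 then c.2.2 + 1 else c.2.2)))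
      (0, 0, 0)
  let counts : List Int := [cs.1, cs.2.1, cs.2.2]
  -- max = 0; for i in range(len(counts)): if counts[i] > max: max = counts[i]
  let m : Int :=
    (PySem.List.pyRange 0 (counts.length : Int) 1).foldl
      (fun m i => if PySem.List.pyGetD counts i 0 > m then PySem.List.pyGetD counts i 0 else m) 0
  -- for i in range(len(counts)): if counts[i] == max: answer.append(i + 1)
  (PySem.List.pyRange 0 (counts.length : Int) 1).foldl
    (fun acc i => if PySem.List.pyGetD counts i 0 == m then acc ++ [i + 1] else acc) []

-- ===== PORT B =====
-- for i, a in enumerate(answers): k = (i % 40, a); freq[k] = freq.get(k, 0) + 1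
-- counts = [sum(freq.get((j, p[j % len(p)]), 0) for j in range(40)) for p in patterns]
def solution_alt (answers : List Int) : List Int :=
  let freq : PySem.Dict (Int × Int) Int :=
    (PySem.List.enumerate answers).foldl
      (fun d p =>
        let k : Int × Int := (PySem.Int.mod p.1 40, p.2)
        d.insert k (d.getD k 0 + 1))
      PySem.Dict.empty
  let patterns : List (List Int) :=
    [[1, 2, 3, 4, 5], [2, 1, 2, 3, 2, 4, 2, 5], [3, 3, 1, 1, 2, 2, 4, 4, 5, 5]]
  let counts : List Int :=
    patterns.map (fun p =>
      ((PySem.List.pyRange 0 40 1).map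
        (fun j => freq.getD (j, PySem.List.pyGetD p (PySem.Int.mod j (p.length : Int)) 0) 0)).sum)
  match PySem.List.max? counts (fun x => x) with
  | none => []
  | some m => ((PySem.List.enumerate counts).filter (fun p => p.2 == m)).map (fun p => p.1 + 1)

-- ===== PRECONDITION & SPEC =====
def Spec_solution (answers : List Int) (out : List Int) : Prop := out = solution_alt answers
instance (answers : List Int) (out : List Int) : Decidable (Spec_solution answers out) := by unfold Spec_solution; infer_instance

-- ===== CLAIM (what is proved, stated in full; the proofs are below) =====
def Claim_equal_solution : Prop := ∀ (answers : List Int), Dom_solution answers → Spec_solution answers (solution answers)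

-- ===== LEMMAS AND PROOFS =====

-- number of positions i with answers[i] == pat[i % L]  (the common value both sides reach)
def cntA (answers pat : List Int) (L : Int) : Int :=
  ((PySem.List.enumerate answers).countP
    (fun p => p.2 == PySem.List.pyGetD pat (PySem.Int.mod p.1 L) 0) : Int)

-- A's combined fold splits into three independent 0/1-sum folds.
theorem fold_split {β : Type} (l : List β) (b1 b2 b3 : β → Bool) (c1 c2 c3 : Int) :
    l.foldl (fun (c : Int × Int × Int) p =>
        ((if b1 p then c.1 + 1 else c.1),
         (if b2 p then c.2.1 + 1 else c.2.1),
         (if b3 p then c.2.2 + 1 else c.2.2))) (c1, c2, c3)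
      = (c1 + l.foldl (fun s p => s + (if b1 p then 1 else 0)) 0,
         c2 + l.foldl (fun s p => s + (if b2 p then 1 else 0)) 0,
         c3 + l.foldl (fun s p => s + (if b3 p then 1 else 0)) 0) := by
  induction l generalizing c1 c2 c3 with
  | nil => simp
  | cons x xs ih =>
      simp only [List.foldl_cons]
      rw [ih]
      simp only [PySem.List.foldl_add]
      simp only [Prod.mk.injEq]
      split_ifs <;> refine ⟨by omega, by omega, by omega⟩

theorem cntA_nonneg (answers pat : List Int) (L : Int) : 0 ≤ cntA answers pat L :=
  Int.natCast_nonneg _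

-- A's counter triple equals the three cntA values.
theorem cs_eq (answers : List Int) :
    (PySem.List.pyRange 0 (answers.length : Int) 1).foldl
      (fun (c : Int × Int × Int) i =>
        ((if PySem.List.pyGetD answers i 0 == PySem.List.pyGetD [1, 2, 3, 4, 5] (PySem.Int.mod i 5) 0 then c.1 + 1 else c.1),
         (if PySem.List.pyGetD answers i 0 == PySem.List.pyGetD [2, 1, 2, 3, 2, 4, 2, 5] (PySem.Int.mod i 8) 0 then c.2.1 + 1 else c.2.1),
         (if PySem.List.pyGetD answers i 0 == PySem.List.pyGetD [3, 3, 1, 1, 2, 2, 4, 4, 5, 5] (PySem.Int.mod i 10) 0 then c.2.2 + 1 else c.2.2)))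
      (0, 0, 0)
    = (cntA answers [1, 2, 3, 4, 5] 5,
       cntA answers [2, 1, 2, 3, 2, 4, 2, 5] 8,
       cntA answers [3, 3, 1, 1, 2, 2, 4, 4, 5, 5] 10) := by
  have he := PySem.List.enumerate_eq_map_pyRange answers (0 : Int)
  rw [fold_split (PySem.List.pyRange 0 (answers.length : Int) 1)
        (fun i => PySem.List.pyGetD answers i 0 == PySem.List.pyGetD [1, 2, 3, 4, 5] (PySem.Int.mod i 5) 0)
        (fun i => PySem.List.pyGetD answers i 0 == PySem.List.pyGetD [2, 1, 2, 3, 2, 4, 2, 5] (PySem.Int.mod i 8) 0)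
        (fun i => PySem.List.pyGetD answers i 0 == PySem.List.pyGetD [3, 3, 1, 1, 2, 2, 4, 4, 5, 5] (PySem.Int.mod i 10) 0) 0 0 0]
  simp only [cntA, he, List.countP_map, PySem.List.foldl_add,
    PySem.List.sum_map_ite_one_zero, PySem.List.len, zero_add, Function.comp_def]

-- B's histogram lookup is a count in the (i % 40, a)-mapped enumeration.
theorem freq_getD (answers : List Int) (k : Int × Int) :
    ((PySem.List.enumerate answers).foldl
      (fun d p =>
        let kk : Int × Int := (PySem.Int.mod p.1 40, p.2)
        d.insert kk (d.getD kk 0 + 1))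
      PySem.Dict.empty).getD k 0
    = (((PySem.List.enumerate answers).map (fun p => (PySem.Int.mod p.1 40, p.2))).count k : Int) := by
  have h := PySem.Dict.getD_foldl_insert_add_one
    ((PySem.List.enumerate answers).map (fun p => (PySem.Int.mod p.1 40, p.2)))
    PySem.Dict.empty k
  rw [List.foldl_map] at h
  simpa [PySem.Dict.getD_empty] using h

-- summing a function that vanishes off m over a Nodup list containing m gives its value at m
theorem sum_single (R : List Int) (hnd : R.Nodup) (m : Int) (hm : m ∈ R) (c : Int → Int)
    (hzero : ∀ j ∈ R, j ≠ m → c j = 0) : (R.map c).sum = c m := by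
  induction R with
  | nil => cases hm
  | cons r R ih =>
      rcases List.nodup_cons.1 hnd with ⟨hr, hndR⟩
      by_cases h : r = m
      · subst h
        have : (R.map c).sum = 0 := by
          apply List.sum_eq_zero
          intro x hx
          rcases List.mem_map.1 hx with ⟨j, hj, rfl⟩
          exact hzero j (List.mem_cons_of_mem _ hj) (fun e => hr (e ▸ hj))
        simp [this]
      · have hmR : m ∈ R := by
          rcases List.mem_cons.1 hm with h' | h'
          · exact absurd h'.symm h
          · exact h'
        rw [List.map_cons, List.sum_cons,
          hzero r (List.mem_cons_self) h,
          ih hndR hmR (fun j hj hjm => hzero j (List.mem_cons_of_mem _ hj) hjm)]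
        ring

-- the 40-bucket lookup sum collapses to the direct per-element count
theorem sum_count (e : List (Int × Int)) (g : Int → Int) :
    ((PySem.List.pyRange 0 40 1).map
      (fun j => ((e.map (fun p => (PySem.Int.mod p.1 40, p.2))).count (j, g j) : Int))).sum
    = ((e.countP (fun p => p.2 == g (PySem.Int.mod p.1 40))) : Int) := by
  induction e with
  | nil => simp
  | cons p e ih =>
      have hcnt : ∀ j : Int,
          (((p :: e).map (fun q => (PySem.Int.mod q.1 40, q.2))).count (j, g j) : Int)
          = ((e.map (fun q => (PySem.Int.mod q.1 40, q.2))).count (j, g j) : Int)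
            + (if (PySem.Int.mod p.1 40, p.2) = (j, g j) then 1 else 0) := by
        intro j
        rw [List.map_cons, List.count_cons]
        push_cast
        split_ifs with h1 h2 h2 <;> simp_all
      simp only [hcnt]
      rw [PySem.List.sum_map_add_int, ih]
      have hsingle :
          ((PySem.List.pyRange 0 40 1).map
            (fun j => (if (PySem.Int.mod p.1 40, p.2) = (j, g j) then (1:Int) else 0))).sum
          = if p.2 == g (PySem.Int.mod p.1 40) then 1 else 0 := by
        rw [sum_single (PySem.List.pyRange 0 40 1) (PySem.List.nodup_pyRange_one 0 40)
              (PySem.Int.mod p.1 40)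
              ((PySem.List.mem_pyRange_one).2
                ⟨PySem.Int.mod_nonneg p.1 (by norm_num),
                 PySem.Int.mod_lt p.1 (by norm_num)⟩)]
        · simp [Prod.ext_iff]
        · intro j hj hjm
          exact if_neg (fun h => hjm (congrArg Prod.fst h).symm)
      rw [hsingle, List.countP_cons]
      split_ifs <;> push_cast <;> ring

-- i % 40 % L = i % L when L divides 40
theorem modmod (i L : Int) (hL : 0 < L) (hdvd : L ∣ 40) :
    PySem.Int.mod (PySem.Int.mod i 40) L = PySem.Int.mod i L := by
  rw [PySem.Int.mod_eq_emod_of_pos hL, PySem.Int.mod_eq_emod_of_pos (by norm_num : (0:Int) < 40),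
    PySem.Int.mod_eq_emod_of_pos hL, Int.emod_emod_of_dvd _ hdvd]

-- B's bucket sum for one pattern equals cntA
theorem bucket_eq (answers pat : List Int) (L : Int) (hL : 0 < L) (hdvd : L ∣ 40) :
    ((PySem.List.pyRange 0 40 1).map
      (fun j => (((PySem.List.enumerate answers).map (fun p => (PySem.Int.mod p.1 40, p.2))).count
        (j, PySem.List.pyGetD pat (PySem.Int.mod j L) 0) : Int))).sum
    = cntA answers pat L := by
  rw [sum_count (PySem.List.enumerate answers) (fun j => PySem.List.pyGetD pat (PySem.Int.mod j L) 0)]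
  unfold cntA
  congr 1
  apply List.countP_congr
  intro p _
  rw [modmod p.1 L hL hdvd]

-- the tails of both programs agree on a 3-element nonnegative counts list
theorem tail_eq (x y z : Int) (hx : 0 ≤ x) (_hy : 0 ≤ y) (_hz : 0 ≤ z) :
    (PySem.List.pyRange 0 (([x, y, z] : List Int).length : Int) 1).foldl
      (fun acc i => if PySem.List.pyGetD [x, y, z] i 0 ==
          (PySem.List.pyRange 0 (([x, y, z] : List Int).length : Int) 1).foldl
            (fun m i => if PySem.List.pyGetD [x, y, z] i 0 > m then PySem.List.pyGetD [x, y, z] i 0 else m) 0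
        then acc ++ [i + 1] else acc) []
    = (match PySem.List.max? [x, y, z] (fun v => v) with
       | none => []
       | some m => ((PySem.List.enumerate [x, y, z]).filter (fun p => p.2 == m)).map (fun p => p.1 + 1)) := by
  have hr : PySem.List.pyRange 0 (([x, y, z] : List Int).length : Int) 1 = [0, 1, 2] := by
    norm_num [PySem.List.pyRange_one]
    decide
  have e0 : PySem.List.pyGetD [x, y, z] 0 0 = x := rfl
  have e1 : PySem.List.pyGetD [x, y, z] 1 0 = y := rfl
  have e2 : PySem.List.pyGetD [x, y, z] 2 0 = z := rfl
  rw [hr, PySem.List.max?_id_cons]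
  simp only [List.foldl_cons, List.foldl_nil, e0, e1, e2,
    PySem.List.enumerate_cons, PySem.List.enumerate_nil]
  have hm0 : (if x > 0 then x else 0) = x := by split_ifs <;> omega
  simp only [hm0]
  have hR : max (max x y) z = (if z > if y > x then y else x then z else if y > x then y else x) := by
    simp only [max_def]
    split_ifs <;> omega
  rw [hR]
  simp only [List.filter_cons, List.filter_nil]
  split_ifs <;> simp_all

-- ===== VERDICT (by name: the statement is the Claim_ definition above) =====
theorem solution_spec : Claim_equal_solution := by
  intro answers _
  show solution answers = solution_alt answers
  unfold solution solution_alt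
  simp only [List.map_cons, List.map_nil]
  rw [cs_eq]
  simp only [freq_getD, List.length_cons, List.length_nil]
  norm_num only
  rw [bucket_eq answers [1, 2, 3, 4, 5] 5 (by norm_num) (by norm_num),
    bucket_eq answers [2, 1, 2, 3, 2, 4, 2, 5] 8 (by norm_num) (by norm_num),
    bucket_eq answers [3, 3, 1, 1, 2, 2, 4, 4, 5, 5] 10 (by norm_num) (by norm_num)]
  exact tail_eq _ _ _ (cntA_nonneg _ _ _) (cntA_nonneg _ _ _) (cntA_nonneg _ _ _)
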